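-- pv_equiv track=rewrite | github.com/suiiim/codetest | leetcode/python/daily_question/partition_array_according_to_given_pivot.py | pivotArray3
-- ===== SOURCE A (Python) =====
-- from typing import List
--
-- def pivotArray3(nums: List[int], pivot: int) -> List[int]:
--     n = nums.copy()
--     nums.clear()
--     less, piv, gre = [], [], []
--     for i in n:
--         if i < pivot:
--             less.append(i)
--         if i == pivot:
--             piv.append(i)
--         if i > pivot:
--             gre.append(i)
--     nums = [*less, *piv, *gre]
--     return nums
-- ===== SOURCE B (Python) =====
-- from typing import List
--
-- def pivotArray3(nums: List[int], pivot: int) -> List[int]: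
--     n = nums.copy()
--     nums.clear()  # preserve A's in-place mutation of the argument
--     lessCount = 0
--     eqCount = 0
--     for x in n:
--         if x < pivot:
--             lessCount += 1
--         elif x == pivot:
--             eqCount += 1
--     result = [0] * len(n)
--     li, pi, gi = 0, lessCount, lessCount + eqCount
--     for x in n:
--         if x < pivot:
--             result[li] = x
--             li += 1
--         elif x == pivot:
--             result[pi] = x
--             pi += 1
--         else:
--             result[gi] = x
--             gi += 1
--     return result
-- ===== Notes on version B (the rewrite author's own statement) =====
-- stated objective: alternative
-- what changed: Instead of appending to three separate bucket lists and concatenating them, B counts the less/equal elements in one pass, preallocates a result list of the final size, and writes each element directly to its final position via three cursors in a second pass.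
import Mathlib
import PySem

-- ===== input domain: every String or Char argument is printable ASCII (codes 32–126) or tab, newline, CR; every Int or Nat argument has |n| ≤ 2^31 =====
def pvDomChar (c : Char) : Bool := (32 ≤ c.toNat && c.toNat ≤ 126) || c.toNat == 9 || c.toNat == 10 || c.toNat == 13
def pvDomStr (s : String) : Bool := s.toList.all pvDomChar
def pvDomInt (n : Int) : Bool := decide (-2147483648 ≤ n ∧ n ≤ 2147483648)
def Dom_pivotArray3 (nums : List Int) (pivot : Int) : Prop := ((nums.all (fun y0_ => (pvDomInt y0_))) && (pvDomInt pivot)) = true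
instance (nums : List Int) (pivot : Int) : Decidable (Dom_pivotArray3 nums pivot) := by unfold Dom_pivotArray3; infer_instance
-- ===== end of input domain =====

-- B replaces A's three bucket lists + concatenation by a count pass and direct cursor writes
-- into a preallocated result (alternative decomposition, same cost). Both Pythons clear the
-- argument list in place exactly like A; the equivalence proved here is about the return value.


-- ===== PORT A =====
-- literal transliteration: three independent ifs appending to less/piv/gre, then concatenation
def pivotArray3 (nums : List Int) (pivot : Int) : List Int :=
  let n := nums
  let s := n.foldl (fun (s : List Int × List Int × List Int) i =>
    let s := if i < pivot then (s.1 ++ [i], s.2.1, s.2.2) else s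
    let s := if i = pivot then (s.1, s.2.1 ++ [i], s.2.2) else s
    if i > pivot then (s.1, s.2.1, s.2.2 ++ [i]) else s) ([], [], [])
  s.1 ++ s.2.1 ++ s.2.2

-- ===== PORT B =====
-- first pass: count elements < pivot and == pivot
def pivotCounts (l : List Int) (pivot : Int) : Nat × Nat :=
  l.foldl (fun (c : Nat × Nat) x =>
    if x < pivot then (c.1 + 1, c.2)
    else if x = pivot then (c.1, c.2 + 1)
    else c) (0, 0)

-- second pass: write each element to its final slot via the three cursors li/pi/gi
def pivotWrite (pivot : Int) : List Int → List Int → Nat → Nat → Nat → List Int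
  | [], res, _, _, _ => res
  | x :: t, res, li, pi, gi =>
    if x < pivot then pivotWrite pivot t (res.set li x) (li + 1) pi gi
    else if x = pivot then pivotWrite pivot t (res.set pi x) li (pi + 1) gi
    else pivotWrite pivot t (res.set gi x) li pi (gi + 1)

def pivotArray3_alt (nums : List Int) (pivot : Int) : List Int :=
  let n := nums
  let c := pivotCounts n pivot
  pivotWrite pivot n (List.replicate n.length 0) 0 c.1 (c.1 + c.2)

-- ===== PRECONDITION & SPEC =====
def Spec_pivotArray3 (nums : List Int) (pivot : Int) (out : List Int) : Prop := out = pivotArray3_alt nums pivot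
instance (nums : List Int) (pivot : Int) (out : List Int) : Decidable (Spec_pivotArray3 nums pivot out) := by unfold Spec_pivotArray3; infer_instance

-- ===== CLAIM (what is proved, stated in full; the proofs are below) =====
def Claim_equal_pivotArray3 : Prop := ∀ (nums : List Int) (pivot : Int), Dom_pivotArray3 nums pivot → Spec_pivotArray3 nums pivot (pivotArray3 nums pivot)

-- ===== LEMMAS AND PROOFS =====

-- A's fold appends the three filters to the running accumulators
theorem foldA_eq (p : Int) : ∀ (l L P G : List Int),
    l.foldl (fun (s : List Int × List Int × List Int) i =>
      let s := if i < p then (s.1 ++ [i], s.2.1, s.2.2) else s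
      let s := if i = p then (s.1, s.2.1 ++ [i], s.2.2) else s
      if i > p then (s.1, s.2.1, s.2.2 ++ [i]) else s) (L, P, G)
    = (L ++ l.filter (fun x => decide (x < p)),
       P ++ l.filter (fun x => decide (x = p)),
       G ++ l.filter (fun x => decide (p < x))) := by
  intro l
  induction l with
  | nil => simp
  | cons x t ih =>
    intro L P G
    simp only [List.foldl_cons, List.filter_cons]
    rcases lt_trichotomy x p with h | h | h
    · have h2 : ¬ x = p := by omega
      have h3 : ¬ p < x := by omega
      simp [h, h2, h3, ih]
    · have h2 : ¬ x < p := by omega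
      have h3 : ¬ p < x := by omega
      simp [h, h2, h3, ih]
    · have h2 : ¬ x = p := by omega
      have h3 : ¬ x < p := by omega
      simp [h, h2, h3, ih]

theorem counts_eq (p : Int) : ∀ (l : List Int) (a b : Nat),
    l.foldl (fun (c : Nat × Nat) x =>
      if x < p then (c.1 + 1, c.2)
      else if x = p then (c.1, c.2 + 1)
      else c) (a, b)
    = (a + l.countP (fun x => decide (x < p)), b + l.countP (fun x => decide (x = p))) := by
  intro l
  induction l with
  | nil => simp
  | cons x t ih =>
    intro a b
    simp only [List.foldl_cons, List.countP_cons]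
    rcases lt_trichotomy x p with h | h | h
    · have h2 : ¬ x = p := by omega
      simp [h, h2, ih]
      omega
    · have h2 : ¬ x < p := by omega
      simp [h, h2, ih]
      omega
    · have h2 : ¬ x = p := by omega
      have h3 : ¬ x < p := by omega
      simp [h, h2, h3, ih]

theorem counts_val (l : List Int) (p : Int) :
    pivotCounts l p = (l.countP (fun x => decide (x < p)), l.countP (fun x => decide (x = p))) := by
  unfold pivotCounts
  rw [counts_eq]
  simp

theorem set_at_len {a : Type} (x : a) : ∀ (X : List a) (b : a) (rest : List a),
    (X ++ b :: rest).set X.length x = X ++ x :: rest := by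
  intro X
  induction X with
  | nil => simp
  | cons y Y ih => intro b rest; simp [ih]

theorem length_trichotomy (p : Int) (l : List Int) :
    l.length = l.countP (fun x => decide (x < p)) + l.countP (fun x => decide (x = p))
      + l.countP (fun x => decide (p < x)) := by
  induction l with
  | nil => simp
  | cons x t ih =>
    simp only [List.length_cons, List.countP_cons]
    rcases lt_trichotomy x p with h | h | h
    · have h2 : ¬ x = p := by omega
      have h3 : ¬ p < x := by omega
      simp [h, h2, h3]; omega
    · have h2 : ¬ x < p := by omega
      have h3 : ¬ p < x := by omega
      simp [h, h2, h3]; omega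
    · have h2 : ¬ x = p := by omega
      have h3 : ¬ x < p := by omega
      simp [h, h2, h3]; omega

-- invariant of the write loop: L/P/G already written, A/B/C the still-unwritten slots
theorem write_inv (p : Int) : ∀ (t L A P B G C : List Int) (li pi gi : Nat),
    li = L.length →
    pi = L.length + A.length + P.length →
    gi = L.length + A.length + P.length + B.length + G.length →
    A.length = t.countP (fun x => decide (x < p)) →
    B.length = t.countP (fun x => decide (x = p)) →
    C.length = t.countP (fun x => decide (p < x)) →
    pivotWrite p t (L ++ (A ++ (P ++ (B ++ (G ++ C))))) li pi gi
    = L ++ (t.filter (fun x => decide (x < p)) ++ (P ++ (t.filter (fun x => decide (x = p))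
        ++ (G ++ t.filter (fun x => decide (p < x)))))) := by
  intro t
  induction t with
  | nil =>
    intro L A P B G C li pi gi h1 h2 h3 hA hB hC
    simp at hA hB hC
    simp [hA, hB, hC, pivotWrite]
  | cons x t ih =>
    intro L A P B G C li pi gi h1 h2 h3 hA hB hC
    subst h1; subst h2; subst h3
    simp only [List.countP_cons] at hA hB hC
    simp only [pivotWrite]
    rcases lt_trichotomy x p with h | h | h
    · have h2 : ¬ x = p := by omega
      have h3 : ¬ p < x := by omega
      rw [if_pos h]
      have hA' : A.length = t.countP (fun x => decide (x < p)) + 1 := by simpa [h] using hA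
      have hB' : B.length = t.countP (fun x => decide (x = p)) := by simpa [h2] using hB
      have hC' : C.length = t.countP (fun x => decide (p < x)) := by simpa [h3] using hC
      obtain ⟨a, A', rfl⟩ : ∃ a A', A = a :: A' := by
        cases A with
        | nil => simp at hA'
        | cons a A' => exact ⟨a, A', rfl⟩
      have hset : (L ++ ((a :: A') ++ (P ++ (B ++ (G ++ C))))).set L.length x
          = (L ++ [x]) ++ (A' ++ (P ++ (B ++ (G ++ C)))) := by
        rw [show L ++ ((a :: A') ++ (P ++ (B ++ (G ++ C))))
              = L ++ a :: (A' ++ (P ++ (B ++ (G ++ C)))) from by simp]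
        rw [set_at_len]; simp
      rw [hset]
      rw [ih (L ++ [x]) A' P B G C _ _ _ (by simp) (by simp <;> omega) (by simp <;> omega)
          (by simpa using hA') hB' hC']
      simp [List.filter_cons, h, h2, h3]
    · have h2 : ¬ x < p := by omega
      have h3 : ¬ p < x := by omega
      rw [if_neg h2, if_pos h]
      have hA' : A.length = t.countP (fun x => decide (x < p)) := by simpa [h2] using hA
      have hB' : B.length = t.countP (fun x => decide (x = p)) + 1 := by simpa [h] using hB
      have hC' : C.length = t.countP (fun x => decide (p < x)) := by simpa [h3] using hC
      obtain ⟨b, B', rfl⟩ : ∃ b B', B = b :: B' := by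
        cases B with
        | nil => simp at hB'
        | cons b B' => exact ⟨b, B', rfl⟩
      have hset : (L ++ (A ++ (P ++ ((b :: B') ++ (G ++ C))))).set (L.length + A.length + P.length) x
          = L ++ (A ++ ((P ++ [x]) ++ (B' ++ (G ++ C)))) := by
        rw [show L ++ (A ++ (P ++ ((b :: B') ++ (G ++ C))))
              = (L ++ (A ++ P)) ++ b :: (B' ++ (G ++ C)) from by simp]
        rw [show L.length + A.length + P.length = (L ++ (A ++ P)).length from by simp <;> omega]
        rw [set_at_len]; simp
      rw [hset]
      rw [ih L A (P ++ [x]) B' G C _ _ _ rfl (by simp <;> omega) (by simp <;> omega)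
          hA' (by simpa using hB') hC']
      simp [List.filter_cons, h, h2, h3]
    · have h2 : ¬ x = p := by omega
      have h3 : ¬ x < p := by omega
      rw [if_neg h3, if_neg h2]
      have hA' : A.length = t.countP (fun x => decide (x < p)) := by simpa [h3] using hA
      have hB' : B.length = t.countP (fun x => decide (x = p)) := by simpa [h2] using hB
      have hC' : C.length = t.countP (fun x => decide (p < x)) + 1 := by simpa [h] using hC
      obtain ⟨c, C', rfl⟩ : ∃ c C', C = c :: C' := by
        cases C with
        | nil => simp at hC'
        | cons c C' => exact ⟨c, C', rfl⟩
      have hset : (L ++ (A ++ (P ++ (B ++ (G ++ (c :: C')))))).set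
            (L.length + A.length + P.length + B.length + G.length) x
          = L ++ (A ++ (P ++ (B ++ ((G ++ [x]) ++ C')))) := by
        rw [show L ++ (A ++ (P ++ (B ++ (G ++ (c :: C')))))
              = (L ++ (A ++ (P ++ (B ++ G)))) ++ c :: C' from by simp]
        rw [show L.length + A.length + P.length + B.length + G.length
              = (L ++ (A ++ (P ++ (B ++ G)))).length from by simp <;> omega]
        rw [set_at_len]; simp
      rw [hset]
      rw [ih L A P B (G ++ [x]) C' _ _ _ rfl (by simp <;> omega) (by simp <;> omega)
          hA' hB' (by simpa using hC')]
      simp [List.filter_cons, h, h2, h3]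

theorem alt_eq_filters (nums : List Int) (pivot : Int) :
    pivotArray3_alt nums pivot
    = nums.filter (fun x => decide (x < pivot)) ++ nums.filter (fun x => decide (x = pivot))
        ++ nums.filter (fun x => decide (pivot < x)) := by
  unfold pivotArray3_alt
  show pivotWrite pivot nums (List.replicate nums.length 0) 0
      (pivotCounts nums pivot).1 ((pivotCounts nums pivot).1 + (pivotCounts nums pivot).2) = _
  rw [counts_val]
  show pivotWrite pivot nums (List.replicate nums.length 0) 0
      (nums.countP (fun x => decide (x < pivot)))
      (nums.countP (fun x => decide (x < pivot)) + nums.countP (fun x => decide (x = pivot))) = _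
  rw [length_trichotomy pivot nums, List.replicate_add, List.replicate_add, List.append_assoc]
  have key := write_inv pivot nums []
      (List.replicate (nums.countP (fun x => decide (x < pivot))) 0) []
      (List.replicate (nums.countP (fun x => decide (x = pivot))) 0) []
      (List.replicate (nums.countP (fun x => decide (pivot < x))) 0)
      0 (nums.countP (fun x => decide (x < pivot)))
      (nums.countP (fun x => decide (x < pivot)) + nums.countP (fun x => decide (x = pivot)))
      (by simp) (by simp) (by simp) (by simp) (by simp) (by simp)
  simp only [List.nil_append, List.append_nil] at key
  rw [key]
  simp [List.append_assoc]

-- ===== VERDICT (by name: the statement is the Claim_ definition above) =====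
theorem pivotArray3_spec : Claim_equal_pivotArray3 := by
  intro nums pivot _
  unfold Spec_pivotArray3
  rw [alt_eq_filters]
  unfold pivotArray3
  show (List.foldl (fun (s : List Int × List Int × List Int) i =>
      let s := if i < pivot then (s.1 ++ [i], s.2.1, s.2.2) else s
      let s := if i = pivot then (s.1, s.2.1 ++ [i], s.2.2) else s
      if i > pivot then (s.1, s.2.1, s.2.2 ++ [i]) else s) ([], [], []) nums).1
    ++ (List.foldl (fun (s : List Int × List Int × List Int) i =>
      let s := if i < pivot then (s.1 ++ [i], s.2.1, s.2.2) else s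
      let s := if i = pivot then (s.1, s.2.1 ++ [i], s.2.2) else s
      if i > pivot then (s.1, s.2.1, s.2.2 ++ [i]) else s) ([], [], []) nums).2.1
    ++ (List.foldl (fun (s : List Int × List Int × List Int) i =>
      let s := if i < pivot then (s.1 ++ [i], s.2.1, s.2.2) else s
      let s := if i = pivot then (s.1, s.2.1 ++ [i], s.2.2) else s
      if i > pivot then (s.1, s.2.1, s.2.2 ++ [i]) else s) ([], [], []) nums).2.2 = _
  rw [foldA_eq]
  simp
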